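-- pv_equiv track=rewrite | github.com/DarkCartographer/Quine-McCluskey-Implementation-in-Python | QM_MultiOutput.py | parse_blif
-- ===== SOURCE A (Python) =====
-- def parse_blif(file_content):
--     lines = [line.strip() for line in file_content if line.strip() and not line.strip().startswith('#')]   #removes white-space and comments
--     model_name = ""  #store model name
--     inputs = []     #input variables
--     outputs = []    #output variables
--     names_blocks = []   #logic blocks
--     i = 0
--
--     #iterate through every line collecting information and storing them in the corresponding list
--     while i < len(lines):
--         line = lines[i]
--         if line.startswith('.model'):
--             model_name = line.split()[1]
--             i += 1
--         elif line.startswith('.inputs'):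
--             inputs.extend(line.split()[1:])
--             i += 1
--         elif line.startswith('.outputs'):
--             outputs.extend(line.split()[1:])
--             i += 1
--         elif line.startswith('.names'):
--             block_inputs_outputs = line.split()[1:]
--             block = {'inputs_outputs': block_inputs_outputs, 'lines': []}
--             i += 1
--             while i < len(lines) and not lines[i].startswith('.'):
--                 block['lines'].append(lines[i])
--                 i += 1
--             names_blocks.append(block)
--         elif line.startswith('.end'):
--             break
--         else:
--             i += 1
--     return model_name, inputs, outputs, names_blocks
-- ===== SOURCE B (Python) =====
-- def parse_blif(file_content):
--     # Single pass: a state machine carrying the currently open .names block.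
--     model_name = ""
--     inputs = []
--     outputs = []
--     names_blocks = []
--     current = None
--     for raw in file_content:
--         line = raw.strip()
--         if not line or line.startswith('#'):
--             continue
--         if line.startswith('.'):
--             current = None  # any dot directive closes an open block
--             if line.startswith('.model'):
--                 model_name = line.split()[1]
--             elif line.startswith('.inputs'):
--                 inputs.extend(line.split()[1:])
--             elif line.startswith('.outputs'):
--                 outputs.extend(line.split()[1:])
--             elif line.startswith('.names'):
--                 current = {'inputs_outputs': line.split()[1:], 'lines': []}
--                 names_blocks.append(current)
--             elif line.startswith('.end'):
--                 break
--         elif current is not None: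
--             current['lines'].append(line)
--     return model_name, inputs, outputs, names_blocks
-- ===== Notes on version B (the rewrite author's own statement) =====
-- stated objective: simpler
-- what changed: Replaces the index-driven while loop with its read-ahead inner while by a single for-loop state machine that carries the currently open .names block; each line is stripped once instead of three times and no intermediate filtered list is built.
import Mathlib
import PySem

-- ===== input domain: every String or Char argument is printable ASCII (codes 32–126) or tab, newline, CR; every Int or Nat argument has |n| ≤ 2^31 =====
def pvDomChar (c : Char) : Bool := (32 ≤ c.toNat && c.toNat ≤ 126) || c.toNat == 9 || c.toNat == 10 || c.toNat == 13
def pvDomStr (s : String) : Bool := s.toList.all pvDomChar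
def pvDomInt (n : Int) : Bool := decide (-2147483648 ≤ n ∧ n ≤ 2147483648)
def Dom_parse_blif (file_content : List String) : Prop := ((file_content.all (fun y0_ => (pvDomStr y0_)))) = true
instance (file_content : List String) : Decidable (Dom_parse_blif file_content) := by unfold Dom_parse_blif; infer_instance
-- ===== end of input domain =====

-- B replaces A's index-driven while loop (with its read-ahead inner while for .names bodies)
-- by a single for-loop state machine carrying the currently open .names block (objective: simpler).

-- ===== PORT A =====
-- the comprehension '[line.strip() for line in file_content if line.strip() and not line.strip().startswith('#')]'
-- (strip is computed once; Python recomputes the same value)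
def pvStripA (raw : String) : Option String :=
  let s := PySem.Str.strip raw
  if s ≠ "" ∧ ¬ (PySem.Str.startswith s "#" = true) then some s else none

-- A's outer while over the index i, transcribed as recursion on the remaining lines;
-- the inner 'while … not lines[i].startswith('.')' is the takeWhile/dropWhile pair.
-- 'line.split()[1]' raises IndexError when absent: pyGet? gives none there (excluded by Pre_), .getD "" totalises.
-- 'split()[1:]' on a Python list is exactly List.drop 1.
def pvLoopA : List String → String → List String → List String →
    List (List (String × List String)) →
    String × List String × List String × List (List (String × List String))
  | [], m, ins, outs, nbs => (m, ins, outs, nbs)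
  | line :: rest, m, ins, outs, nbs =>
    if PySem.Str.startswith line ".model" then
      pvLoopA rest ((PySem.List.pyGet? (PySem.Str.split₀ line) 1).getD "") ins outs nbs
    else if PySem.Str.startswith line ".inputs" then
      pvLoopA rest m (ins ++ (PySem.Str.split₀ line).drop 1) outs nbs
    else if PySem.Str.startswith line ".outputs" then
      pvLoopA rest m ins (outs ++ (PySem.Str.split₀ line).drop 1) nbs
    else if PySem.Str.startswith line ".names" then
      pvLoopA (rest.dropWhile (fun l => !(PySem.Str.startswith l "."))) m ins outs
        (nbs ++ [[("inputs_outputs", (PySem.Str.split₀ line).drop 1),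
                  ("lines", rest.takeWhile (fun l => !(PySem.Str.startswith l ".")))]])
    else if PySem.Str.startswith line ".end" then
      (m, ins, outs, nbs)
    else
      pvLoopA rest m ins outs nbs
  termination_by lines => lines.length
  decreasing_by
    · simp
    · simp
    · simp
    · simp only [List.length_cons]
      exact Nat.lt_succ_of_le (List.length_dropWhile_le _ _)
    · simp

def parse_blif (file_content : List String) : String × List String × List String × (List (List (String × List String))) :=
  pvLoopA (file_content.filterMap pvStripA) "" [] [] []

-- ===== PORT B =====
-- the mutable dict 'current' (shared with names_blocks) is carried as an Option (ios, lines)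
-- and flushed into the finished list when it is closed / at the end.
def pvFlush (cur : Option (List String × List String)) : List (List (String × List String)) :=
  match cur with
  | some (ios, ls) => [[("inputs_outputs", ios), ("lines", ls)]]
  | none => []

def pvLoopB : List String → String → List String → List String →
    List (List (String × List String)) → Option (List String × List String) →
    String × List String × List String × List (List (String × List String))
  | [], m, ins, outs, done, cur => (m, ins, outs, done ++ pvFlush cur)
  | raw :: rest, m, ins, outs, done, cur =>
    let line := PySem.Str.strip raw
    if line = "" ∨ PySem.Str.startswith line "#" = true then
      pvLoopB rest m ins outs done cur
    else if PySem.Str.startswith line "." then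
      let done' := done ++ pvFlush cur
      if PySem.Str.startswith line ".model" then
        pvLoopB rest ((PySem.List.pyGet? (PySem.Str.split₀ line) 1).getD "") ins outs done' none
      else if PySem.Str.startswith line ".inputs" then
        pvLoopB rest m (ins ++ (PySem.Str.split₀ line).drop 1) outs done' none
      else if PySem.Str.startswith line ".outputs" then
        pvLoopB rest m ins (outs ++ (PySem.Str.split₀ line).drop 1) done' none
      else if PySem.Str.startswith line ".names" then
        pvLoopB rest m ins outs done' (some ((PySem.Str.split₀ line).drop 1, []))
      else if PySem.Str.startswith line ".end" then
        (m, ins, outs, done')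
      else
        pvLoopB rest m ins outs done' none
    else
      match cur with
      | some (ios, ls) => pvLoopB rest m ins outs done (some (ios, ls ++ [line]))
      | none => pvLoopB rest m ins outs done none

def parse_blif_alt (file_content : List String) : String × List String × List String × (List (List (String × List String))) :=
  pvLoopB file_content "" [] [] [] none

-- ===== PRECONDITION & SPEC =====
-- Pre_ excludes exactly the inputs on which A (and B alike) raises IndexError:
-- a reachable '.model' directive (before the first '.end') with no second token.
def Pre_parse_blif (file_content : List String) : Prop :=
  ∀ l ∈ (file_content.filterMap (fun raw =>
          let s := PySem.Str.strip raw
          if s ≠ "" ∧ ¬ (PySem.Str.startswith s "#" = true) then some s else none)).takeWhile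
        (fun l => !(PySem.Str.startswith l ".end")),
    PySem.Str.startswith l ".model" = true → 2 ≤ (PySem.Str.split₀ l).length
instance (file_content : List String) : Decidable (Pre_parse_blif file_content) := by
  unfold Pre_parse_blif; infer_instance

def pvWitness_parse_blif : List String :=
  [".model top", "# a comment", ".inputs a b", ".outputs y", ".names a b y", "11 1", "10 1", ".end"]

def Spec_parse_blif (file_content : List String) (out : String × List String × List String × (List (List (String × List String)))) : Prop := out = parse_blif_alt file_content
instance (file_content : List String) (out : String × List String × List String × (List (List (String × List String)))) : Decidable (Spec_parse_blif file_content out) := by unfold Spec_parse_blif; infer_instance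

-- ===== CLAIM (what is proved, stated in full; the proofs are below) =====
def Claim_equal_parse_blif : Prop := ∀ (file_content : List String), Dom_parse_blif file_content → Pre_parse_blif file_content → Spec_parse_blif file_content (parse_blif file_content)

-- ===== LEMMAS AND PROOFS =====

-- proof-side variant of pvLoopB on already stripped-and-filtered lines (no strip, no skip branch)
def pvLoopB' : List String → String → List String → List String →
    List (List (String × List String)) → Option (List String × List String) →
    String × List String × List String × List (List (String × List String))
  | [], m, ins, outs, done, cur => (m, ins, outs, done ++ pvFlush cur)
  | line :: rest, m, ins, outs, done, cur =>
    if PySem.Str.startswith line "." then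
      let done' := done ++ pvFlush cur
      if PySem.Str.startswith line ".model" then
        pvLoopB' rest ((PySem.List.pyGet? (PySem.Str.split₀ line) 1).getD "") ins outs done' none
      else if PySem.Str.startswith line ".inputs" then
        pvLoopB' rest m (ins ++ (PySem.Str.split₀ line).drop 1) outs done' none
      else if PySem.Str.startswith line ".outputs" then
        pvLoopB' rest m ins (outs ++ (PySem.Str.split₀ line).drop 1) done' none
      else if PySem.Str.startswith line ".names" then
        pvLoopB' rest m ins outs done' (some ((PySem.Str.split₀ line).drop 1, []))
      else if PySem.Str.startswith line ".end" then
        (m, ins, outs, done')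
      else
        pvLoopB' rest m ins outs done' none
    else
      match cur with
      | some (ios, ls) => pvLoopB' rest m ins outs done (some (ios, ls ++ [line]))
      | none => pvLoopB' rest m ins outs done none

set_option maxHeartbeats 2000000 in
lemma pvB_filter (fc : List String) : ∀ m ins outs done cur,
    pvLoopB fc m ins outs done cur = pvLoopB' (fc.filterMap pvStripA) m ins outs done cur := by
  induction fc with
  | nil => intro m ins outs done cur; rfl
  | cons raw rest ih =>
    intro m ins outs done cur
    by_cases hk : PySem.Str.strip raw = "" ∨ PySem.Str.startswith (PySem.Str.strip raw) "#" = true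
    · have hf : pvStripA raw = none := by
        simp only [pvStripA]
        rw [if_neg]; tauto
      simp only [pvLoopB, if_pos hk, List.filterMap_cons, hf]
      exact ih m ins outs done cur
    · have hf : pvStripA raw = some (PySem.Str.strip raw) := by
        simp only [pvStripA]
        rw [if_pos]; tauto
      obtain _ | ⟨ios, ls⟩ := cur <;>
      · simp only [pvLoopB, if_neg hk, List.filterMap_cons, hf, pvLoopB']
        split_ifs <;> first | rfl | apply ih

set_option maxHeartbeats 2000000 in
lemma pvB'_feed (lines : List String) : ∀ m ins outs done ios acc,
    pvLoopB' lines m ins outs done (some (ios, acc)) =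
    pvLoopB' (lines.dropWhile (fun l => !(PySem.Str.startswith l "."))) m ins outs
      (done ++ [[("inputs_outputs", ios),
                 ("lines", acc ++ lines.takeWhile (fun l => !(PySem.Str.startswith l ".")))]]) none := by
  induction lines with
  | nil => intro m ins outs done ios acc; simp [pvLoopB', pvFlush]
  | cons l rest ih =>
    intro m ins outs done ios acc
    by_cases hd : PySem.Str.startswith l "." = true
    · rw [List.dropWhile_cons_of_neg (by simpa using hd), List.takeWhile_cons_of_neg (by simpa using hd)]
      simp only [pvLoopB', if_pos hd, pvFlush, List.append_nil]
    · rw [List.dropWhile_cons_of_pos (by simpa using hd), List.takeWhile_cons_of_pos (by simpa using hd)]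
      simp only [pvLoopB', if_neg hd]
      rw [ih]
      simp

lemma pv_sw_dot {l p : String} (hp : PySem.Chars.startswith p.toList ['.'] = true)
    (h : PySem.Str.startswith l p = true) : PySem.Str.startswith l "." = true := by
  simp only [PySem.Str.startswith_eq, PySem.Chars.startswith_iff] at *
  exact List.IsPrefix.trans hp h

set_option maxHeartbeats 4000000 in
lemma pvAB (n : Nat) : ∀ lines : List String, lines.length ≤ n → ∀ m ins outs nbs,
    pvLoopA lines m ins outs nbs = pvLoopB' lines m ins outs nbs none := by
  induction n with
  | zero =>
    intro lines h m ins outs nbs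
    have : lines = [] := List.eq_nil_of_length_eq_zero (Nat.le_zero.mp h)
    subst this
    simp [pvLoopA, pvLoopB', pvFlush]
  | succ n ih =>
    intro lines hlen m ins outs nbs
    match lines with
    | [] => simp [pvLoopA, pvLoopB', pvFlush]
    | l :: rest =>
      have hr : rest.length ≤ n := by simpa using hlen
      by_cases h1 : PySem.Str.startswith l ".model" = true
      · simp only [pvLoopA, pvLoopB', if_pos h1, if_pos (pv_sw_dot (by decide) h1), pvFlush,
          List.append_nil]
        exact ih rest hr _ _ _ _
      · by_cases h2 : PySem.Str.startswith l ".inputs" = true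
        · simp only [pvLoopA, pvLoopB', if_neg h1, if_pos h2, if_pos (pv_sw_dot (by decide) h2),
            pvFlush, List.append_nil]
          exact ih rest hr _ _ _ _
        · by_cases h3 : PySem.Str.startswith l ".outputs" = true
          · simp only [pvLoopA, pvLoopB', if_neg h1, if_neg h2, if_pos h3,
              if_pos (pv_sw_dot (by decide) h3), pvFlush, List.append_nil]
            exact ih rest hr _ _ _ _
          · by_cases h4 : PySem.Str.startswith l ".names" = true
            · simp only [pvLoopA, pvLoopB', if_neg h1, if_neg h2, if_neg h3, if_pos h4,
                if_pos (pv_sw_dot (by decide) h4), pvFlush, List.append_nil]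
              rw [pvB'_feed]
              simp only [List.nil_append]
              exact ih _ (le_trans (List.length_dropWhile_le _ _) hr) _ _ _ _
            · by_cases h5 : PySem.Str.startswith l ".end" = true
              · simp only [pvLoopA, pvLoopB', if_neg h1, if_neg h2, if_neg h3, if_neg h4,
                  if_pos h5, if_pos (pv_sw_dot (by decide) h5), pvFlush, List.append_nil]
              · by_cases hd : PySem.Str.startswith l "." = true
                · simp only [pvLoopA, pvLoopB', if_neg h1, if_neg h2, if_neg h3, if_neg h4,
                    if_neg h5, if_pos hd, pvFlush, List.append_nil]
                  exact ih rest hr _ _ _ _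
                · simp only [pvLoopA, pvLoopB', if_neg h1, if_neg h2, if_neg h3, if_neg h4,
                    if_neg h5, if_neg hd]
                  exact ih rest hr _ _ _ _

-- ===== VERDICT (by name: the statement is the Claim_ definition above) =====
theorem parse_blif_spec : Claim_equal_parse_blif := by
  intro fc _ _
  unfold Spec_parse_blif parse_blif parse_blif_alt
  rw [pvB_filter]
  exact pvAB (fc.filterMap pvStripA).length _ le_rfl _ _ _ _
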